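-- pv_equiv track=rewrite | github.com/Yenike-RaghuRam/HomeAssignment | Coding/Python/Set4/ReverseStringWithoutModifyPosofSpecial.py | reverse_without_modify_pos_special
-- ===== SOURCE A (Python) =====
-- def reverse_without_modify_pos_special(strs):
--     str_lis = list(strs)
--     start_index = 0
--     end_index = len(str_lis) - 1
--     while start_index < end_index:
--         if not strs[start_index].isalnum():
--             start_index += 1
--         elif not strs[end_index].isalnum():
--             end_index -= 1
--         else:
--             temp = str_lis[start_index]
--             str_lis[start_index] = str_lis[end_index]
--             str_lis[end_index] = temp
--             start_index += 1
--             end_index -= 1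
--     return "".join(str_lis)
-- ===== SOURCE B (Python) =====
-- def reverse_without_modify_pos_special(strs):
--     rev = [c for c in strs if c.isalnum()][::-1]
--     out = []
--     i = 0
--     for c in strs:
--         if c.isalnum():
--             out.append(rev[i])
--             i += 1
--         else:
--             out.append(c)
--     return "".join(out)
-- ===== Notes on version B (the rewrite author's own statement) =====
-- stated objective: simpler
-- what changed: Replaces A's converging two-pointer in-place swap loop with a single reassembly pass over a reversed copy of the alphanumeric characters.
import Mathlib
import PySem

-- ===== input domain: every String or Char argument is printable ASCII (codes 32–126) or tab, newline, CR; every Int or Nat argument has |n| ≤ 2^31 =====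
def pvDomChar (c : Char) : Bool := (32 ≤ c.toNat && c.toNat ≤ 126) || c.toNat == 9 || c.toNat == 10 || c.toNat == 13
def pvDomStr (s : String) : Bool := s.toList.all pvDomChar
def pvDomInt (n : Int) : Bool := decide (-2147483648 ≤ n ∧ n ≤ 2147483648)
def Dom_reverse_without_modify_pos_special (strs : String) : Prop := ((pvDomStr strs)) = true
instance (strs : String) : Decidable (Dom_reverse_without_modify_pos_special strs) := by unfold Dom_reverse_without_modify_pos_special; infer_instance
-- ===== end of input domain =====

-- B replaces A's converging two-pointer in-place swap with one pass that reverses the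
-- alnum characters and reassembles the string (objective: simpler; same cost).

-- ===== PORT A =====
-- A's while loop: two indices converging from the ends, swapping alnum chars in place
-- (whenever s < e both indices are in range, so the total getD never hits its default).
def pvLoopA (orig : List Char) (lis : List Char) (s e : Nat) : List Char :=
  if _h : s < e then
    if PySem.Chars.isalnum (orig.getD s ' ') = false then
      pvLoopA orig lis (s + 1) e
    else if PySem.Chars.isalnum (orig.getD e ' ') = false then
      pvLoopA orig lis s (e - 1)
    else
      pvLoopA orig ((lis.set s (lis.getD e ' ')).set e (lis.getD s ' ')) (s + 1) (e - 1)
  else lis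
termination_by e - s
decreasing_by all_goals omega

def reverse_without_modify_pos_special (strs : String) : String :=
  String.mk (pvLoopA strs.toList strs.toList 0 (strs.toList.length - 1))

-- ===== PORT B =====
-- B's loop: walk the original with an index i into the reversed alnum list
-- (i never runs past rev, so the total getD never hits its default).
def pvLoopB (rev : List Char) : List Char → Nat → List Char
  | [], _ => []
  | c :: cs, i =>
      if PySem.Chars.isalnum c then rev.getD i ' ' :: pvLoopB rev cs (i + 1)
      else c :: pvLoopB rev cs i

def reverse_without_modify_pos_special_alt (strs : String) : String :=
  let rev := (strs.toList.filter PySem.Chars.isalnum).reverse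
  String.mk (pvLoopB rev strs.toList 0)

-- ===== PRECONDITION & SPEC =====
def Spec_reverse_without_modify_pos_special (strs : String) (out : String) : Prop := out = reverse_without_modify_pos_special_alt strs
instance (strs : String) (out : String) : Decidable (Spec_reverse_without_modify_pos_special strs out) := by unfold Spec_reverse_without_modify_pos_special; infer_instance

-- ===== CLAIM (what is proved, stated in full; the proofs are below) =====
def Claim_equal_reverse_without_modify_pos_special : Prop := ∀ (strs : String), Dom_reverse_without_modify_pos_special strs → Spec_reverse_without_modify_pos_special strs (reverse_without_modify_pos_special strs)

-- ===== LEMMAS AND PROOFS =====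

-- the character both programs put at position i of the output
def pvTgt (l : List Char) (i : Nat) : Char :=
  if PySem.Chars.isalnum (l.getD i ' ') then
    ((l.filter PySem.Chars.isalnum).reverse).getD (List.countP PySem.Chars.isalnum (l.take i)) ' '
  else l.getD i ' '

lemma pv_getD_set (xs : List Char) (i j : Nat) (a : Char) (hi : i < xs.length) :
    (xs.set i a).getD j ' ' = if i = j then a else xs.getD j ' ' := by
  simp only [List.getD_eq_getElem?_getD, List.getElem?_set, hi]
  split <;> simp_all

lemma pv_countP_split (p : Char → Bool) (l : List Char) (i : Nat) :
    List.countP p l = List.countP p (l.take i) + List.countP p (l.drop i) := by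
  conv_lhs => rw [← List.take_append_drop i l]
  rw [List.countP_append]

lemma pv_countP_take_succ (p : Char → Bool) (l : List Char) (i : Nat) (h : i < l.length) :
    List.countP p (l.take (i + 1))
      = List.countP p (l.take i) + (if p (l.getD i ' ') then 1 else 0) := by
  rw [List.take_add_one, List.countP_append, List.getElem?_eq_getElem h]
  simp only [Option.toList_some, List.countP_cons, List.countP_nil,
    List.getD_eq_getElem?_getD, List.getElem?_eq_getElem h, Option.getD_some]
  omega

lemma pv_countP_drop_cons (p : Char → Bool) (l : List Char) (i : Nat) (h : i < l.length) :
    List.countP p (l.drop i)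
      = (if p (l.getD i ' ') then 1 else 0) + List.countP p (l.drop (i + 1)) := by
  rw [List.drop_eq_getElem_cons h, List.countP_cons]
  simp only [List.getD_eq_getElem?_getD, List.getElem?_eq_getElem h, Option.getD_some]
  omega

lemma pv_rev_getD (xs : List Char) (j : Nat) (h : j < xs.length) :
    xs.reverse.getD j ' ' = xs.getD (xs.length - 1 - j) ' ' := by
  simp [List.getD_eq_getElem?_getD, List.getElem?_reverse h]

-- the (countP p (take i))-th kept element of the filter is l[i] itself, when p l[i]
lemma pv_filter_getD (p : Char → Bool) (l : List Char) :
    ∀ i, i < l.length → p (l.getD i ' ') = true →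
      List.countP p (l.take i) < (l.filter p).length ∧
      (l.filter p).getD (List.countP p (l.take i)) ' ' = l.getD i ' ' := by
  induction l with
  | nil => intro i hi; simp at hi
  | cons c tl ih =>
    intro i hi hp
    cases i with
    | zero => simp_all
    | succ i =>
      simp only [List.getD_cons_succ] at hp ⊢
      simp only [List.length_cons, Nat.add_lt_add_iff_right] at hi
      obtain ⟨h1, h2⟩ := ih i hi hp
      by_cases hc : p c
      · constructor
        · simp [List.take_succ_cons, hc]; omega
        · rw [List.take_succ_cons, List.countP_cons, List.filter_cons]
          simp only [hc, if_pos]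
          rw [List.getD_cons_succ]
          exact h2
      · constructor
        · simp [List.take_succ_cons, hc]; omega
        · rw [List.take_succ_cons, List.countP_cons, List.filter_cons]
          simp only [hc, if_false, Bool.false_eq_true, Nat.add_zero]
          exact h2

-- pointwise characterization of B's loop
lemma pv_loopB_char (rev : List Char) :
    ∀ (cs : List Char) (i : Nat),
      (pvLoopB rev cs i).length = cs.length ∧
      ∀ j, j < cs.length →
        (pvLoopB rev cs i).getD j ' '
          = if PySem.Chars.isalnum (cs.getD j ' ') then
              rev.getD (i + List.countP PySem.Chars.isalnum (cs.take j)) ' '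
            else cs.getD j ' ' := by
  intro cs
  induction cs with
  | nil => intro i; simp [pvLoopB]
  | cons c tl ih =>
    intro i
    by_cases hc : PySem.Chars.isalnum c
    · refine ⟨by simp [pvLoopB, hc, (ih (i+1)).1], ?_⟩
      intro j hj
      cases j with
      | zero => simp [pvLoopB, hc]
      | succ j =>
        simp only [pvLoopB, if_pos hc, List.getD_cons_succ, List.take_succ_cons,
          List.countP_cons, hc, if_pos, List.length_cons, Nat.add_lt_add_iff_right] at hj ⊢
        rw [(ih (i+1)).2 j hj]
        have : i + 1 + List.countP PySem.Chars.isalnum (List.take j tl)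
            = i + (List.countP PySem.Chars.isalnum (List.take j tl) + 1) := by omega
        rw [this]
    · refine ⟨by simp [pvLoopB, hc, (ih i).1], ?_⟩
      intro j hj
      cases j with
      | zero => simp [pvLoopB, hc]
      | succ j =>
        simp only [pvLoopB, if_neg hc, List.getD_cons_succ, List.take_succ_cons,
          List.countP_cons, hc, List.length_cons, Nat.add_lt_add_iff_right,
          Bool.false_eq_true, if_false, Nat.add_zero] at hj ⊢
        exact (ih i).2 j hj

-- loop invariant of A's two-pointer loop: positions outside [s,e] are final, positions
-- inside are untouched, and equally many alnum chars were consumed on each side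
theorem pv_loopA_char (l : List Char) (s e : Nat) (lis : List Char)
    (hlen : lis.length = l.length) (he : e < l.length)
    (hmid : ∀ i, s ≤ i → i ≤ e → lis.getD i ' ' = l.getD i ' ')
    (hout : ∀ i, i < l.length → (i < s ∨ e < i) → lis.getD i ' ' = pvTgt l i)
    (hbal : List.countP PySem.Chars.isalnum (l.take s)
              = List.countP PySem.Chars.isalnum (l.drop (e + 1))) :
    (pvLoopA l lis s e).length = l.length ∧
    ∀ j, j < l.length → (pvLoopA l lis s e).getD j ' ' = pvTgt l j := by
  rw [pvLoopA]
  by_cases hse : s < e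
  · rw [dif_pos hse]
    have hsl : s < l.length := by omega
    by_cases h1 : PySem.Chars.isalnum (l.getD s ' ') = false
    · rw [if_pos h1]
      refine pv_loopA_char l (s+1) e lis hlen he ?_ ?_ ?_
      · intro i hi1 hi2; exact hmid i (by omega) hi2
      · intro i hil hcase
        rcases hcase with hc | hc
        · rcases Nat.lt_succ_iff_lt_or_eq.mp hc with hc' | hc'
          · exact hout i hil (Or.inl hc')
          · subst hc'
            rw [hmid i le_rfl (by omega)]
            unfold pvTgt
            rw [if_neg (by rw [h1]; simp)]
        · exact hout i hil (Or.inr hc)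
      · rw [pv_countP_take_succ _ _ _ hsl, if_neg (by rw [h1]; simp), Nat.add_zero]
        exact hbal
    · have h1' : PySem.Chars.isalnum (l.getD s ' ') = true := by
        revert h1; cases PySem.Chars.isalnum (l.getD s ' ') <;> simp
      rw [if_neg h1]
      by_cases h2 : PySem.Chars.isalnum (l.getD e ' ') = false
      · rw [if_pos h2]
        refine pv_loopA_char l s (e-1) lis hlen (by omega) ?_ ?_ ?_
        · intro i hi1 hi2; exact hmid i hi1 (by omega)
        · intro i hil hcase
          rcases hcase with hc | hc
          · exact hout i hil (Or.inl hc)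
          · rcases Nat.lt_or_ge e i with hc' | hc'
            · exact hout i hil (Or.inr hc')
            · have hie : i = e := by omega
              subst hie
              rw [hmid i (by omega) le_rfl]
              unfold pvTgt
              rw [if_neg (by rw [h2]; simp)]
        · have hee : e - 1 + 1 = e := by omega
          rw [hee, pv_countP_drop_cons _ _ _ he, if_neg (by rw [h2]; simp), Nat.zero_add]
          exact hbal
      · have h2' : PySem.Chars.isalnum (l.getD e ' ') = true := by
          revert h2; cases PySem.Chars.isalnum (l.getD e ' ') <;> simp
        rw [if_neg h2]
        have hsl' : s < lis.length := by omega
        have hel' : e < lis.length := by omega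
        have hcs : lis.getD s ' ' = l.getD s ' ' := hmid s le_rfl (by omega)
        have hce : lis.getD e ' ' = l.getD e ' ' := hmid e (by omega) le_rfl
        have hset : ∀ j, ((lis.set s (lis.getD e ' ')).set e (lis.getD s ' ')).getD j ' '
            = if e = j then lis.getD s ' ' else if s = j then lis.getD e ' ' else lis.getD j ' ' := by
          intro j
          rw [pv_getD_set _ e j _ (by simpa using hel'), pv_getD_set _ s j _ hsl']
        -- the counting argument
        have hm : List.countP PySem.Chars.isalnum l
            = List.countP PySem.Chars.isalnum (l.take e)
              + (1 + List.countP PySem.Chars.isalnum (l.take s)) := by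
          rw [pv_countP_split PySem.Chars.isalnum l e,
              pv_countP_drop_cons PySem.Chars.isalnum l e he, if_pos h2', ← hbal]
        have hflen : (l.filter PySem.Chars.isalnum).length
            = List.countP PySem.Chars.isalnum l := by
          rw [List.countP_eq_length_filter]
        have hfe := pv_filter_getD PySem.Chars.isalnum l e he h2'
        have hfs := pv_filter_getD PySem.Chars.isalnum l s hsl h1'
        have key1 : pvTgt l s = l.getD e ' ' := by
          unfold pvTgt
          rw [if_pos h1', pv_rev_getD _ _ (by omega)]
          have heq : (l.filter PySem.Chars.isalnum).length - 1
                - List.countP PySem.Chars.isalnum (l.take s)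
              = List.countP PySem.Chars.isalnum (l.take e) := by omega
          rw [heq]
          exact hfe.2
        have key2 : pvTgt l e = l.getD s ' ' := by
          unfold pvTgt
          rw [if_pos h2', pv_rev_getD _ _ (by omega)]
          have heq : (l.filter PySem.Chars.isalnum).length - 1
                - List.countP PySem.Chars.isalnum (l.take e)
              = List.countP PySem.Chars.isalnum (l.take s) := by omega
          rw [heq]
          exact hfs.2
        refine pv_loopA_char l (s+1) (e-1)
          ((lis.set s (lis.getD e ' ')).set e (lis.getD s ' '))
          (by simp [hlen]) (by omega) ?_ ?_ ?_
        · intro i hi1 hi2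
          rw [hset i, if_neg (by omega), if_neg (by omega)]
          exact hmid i (by omega) (by omega)
        · intro i hil hcase
          rw [hset i]
          rcases Nat.lt_or_ge i s with hc | hc
          · rw [if_neg (by omega), if_neg (by omega)]
            exact hout i hil (Or.inl hc)
          · rcases Nat.lt_or_ge e i with hc' | hc'
            · rcases Nat.lt_or_ge e i with _ | _
              · by_cases hie : e = i
                · omega
                · rw [if_neg hie, if_neg (by omega)]
                  exact hout i hil (Or.inr hc')
              · omega
            · -- s ≤ i ≤ e and (i < s+1 or e-1 < i) : i = s or i = e
              rcases hcase with hc2 | hc2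
              · have his : i = s := by omega
                subst his
                rw [if_neg (by omega), if_pos rfl, hce, key1]
              · by_cases hie : i = e
                · subst hie
                  rw [if_pos rfl, hcs, key2]
                · omega
        · have hee : e - 1 + 1 = e := by omega
          rw [hee, pv_countP_take_succ _ _ _ hsl, pv_countP_drop_cons _ _ _ he,
              if_pos h1', if_pos h2', hbal]
          omega
  · rw [dif_neg hse]
    refine ⟨hlen, ?_⟩
    intro j hj
    rcases Nat.lt_or_ge j s with hc | hc
    · exact hout j hj (Or.inl hc)
    · rcases Nat.lt_or_ge e j with hc' | hc'
      · exact hout j hj (Or.inr hc')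
      · -- s ≤ j ≤ e and ¬ s < e : s = j = e
        have hjs : j = s := by omega
        have hje : j = e := by omega
        rw [hmid j hc hc']
        by_cases hpj : PySem.Chars.isalnum (l.getD j ' ') = true
        · unfold pvTgt
          rw [if_pos hpj]
          rw [← hjs, ← hje] at hbal
          have hm : List.countP PySem.Chars.isalnum l
              = List.countP PySem.Chars.isalnum (l.take j)
                + (1 + List.countP PySem.Chars.isalnum (l.take j)) := by
            rw [pv_countP_split PySem.Chars.isalnum l j,
                pv_countP_drop_cons PySem.Chars.isalnum l j hj, if_pos hpj, ← hbal]
          have hflen : (l.filter PySem.Chars.isalnum).length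
              = List.countP PySem.Chars.isalnum l := by
            rw [List.countP_eq_length_filter]
          have hfj := pv_filter_getD PySem.Chars.isalnum l j hj hpj
          rw [pv_rev_getD _ _ (by omega)]
          have heq : (l.filter PySem.Chars.isalnum).length - 1
                - List.countP PySem.Chars.isalnum (l.take j)
              = List.countP PySem.Chars.isalnum (l.take j) := by omega
          rw [heq]
          exact hfj.2.symm
        · unfold pvTgt
          rw [if_neg hpj]
termination_by e - s
decreasing_by all_goals omega

-- ===== VERDICT (by name: the statement is the Claim_ definition above) =====
theorem reverse_without_modify_pos_special_spec : Claim_equal_reverse_without_modify_pos_special := by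
  intro strs _
  unfold Spec_reverse_without_modify_pos_special
  unfold reverse_without_modify_pos_special reverse_without_modify_pos_special_alt
  set l := strs.toList with hl
  set rev := (l.filter PySem.Chars.isalnum).reverse with hrev
  rcases Nat.eq_zero_or_pos l.length with hn | hn
  · have : l = [] := List.eq_nil_of_length_eq_zero hn
    rw [this]
    simp [pvLoopA, pvLoopB]
  · have hA := pv_loopA_char l 0 (l.length - 1) l rfl (by omega)
      (fun i _ _ => rfl)
      (fun i hi hc => by omega)
      (by simp [Nat.sub_add_cancel hn, List.drop_length])
    have hB := pv_loopB_char rev l 0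
    congr 1
    apply List.ext_getElem (by rw [hA.1, hB.1])
    intro j hj1 hj2
    have hjl : j < l.length := by rw [hA.1] at hj1; exact hj1
    have hAj := hA.2 j hjl
    have hBj := hB.2 j hjl
    rw [List.getD_eq_getElem _ _ hj1] at hAj
    rw [List.getD_eq_getElem _ _ hj2] at hBj
    rw [hAj, hBj]
    simp [pvTgt, hrev]
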